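-- pv_equiv track=rewrite | github.com/lightning-goats/cl-hive-archon | modules/archon_service.py | _normalize_poll_options
-- ===== SOURCE A (Python) =====
-- from typing import Any, Callable, Dict, List, Optional
--
-- def _normalize_poll_options(options: List[Any]) -> Optional[List[str]]:
--     if not isinstance(options, list):
--         return None
--     cleaned: List[str] = []
--     for item in options:
--         if not isinstance(item, str):
--             return None
--         value = item.strip()
--         if not value or len(value) > 64:
--             return None
--         if value in cleaned:
--             return None
--         cleaned.append(value)
--     if len(cleaned) < 2 or len(cleaned) > 10:
--         return None
--     return cleaned
-- ===== SOURCE B (Python) =====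
-- from typing import Any, List, Optional
--
-- def _normalize_poll_options(options: List[Any]) -> Optional[List[str]]:
--     if not isinstance(options, list):
--         return None
--     if not all(isinstance(x, str) for x in options):
--         return None
--     cleaned = [x.strip() for x in options]
--     if any(not v or len(v) > 64 for v in cleaned):
--         return None
--     if len(set(cleaned)) != len(cleaned):
--         return None
--     if not (2 <= len(cleaned) <= 10):
--         return None
--     return cleaned
-- ===== Notes on version B (the rewrite author's own statement) =====
-- stated objective: simpler
-- what changed: Replaces the fused per-element early-exit loop (which interleaves type check, strip, length check and an O(n^2) membership scan against the growing accumulator) with a pipeline of whole-list passes: one map to strip, one any() for the length constraints, a set-based duplicate check, then the count bounds.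
import Mathlib
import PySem

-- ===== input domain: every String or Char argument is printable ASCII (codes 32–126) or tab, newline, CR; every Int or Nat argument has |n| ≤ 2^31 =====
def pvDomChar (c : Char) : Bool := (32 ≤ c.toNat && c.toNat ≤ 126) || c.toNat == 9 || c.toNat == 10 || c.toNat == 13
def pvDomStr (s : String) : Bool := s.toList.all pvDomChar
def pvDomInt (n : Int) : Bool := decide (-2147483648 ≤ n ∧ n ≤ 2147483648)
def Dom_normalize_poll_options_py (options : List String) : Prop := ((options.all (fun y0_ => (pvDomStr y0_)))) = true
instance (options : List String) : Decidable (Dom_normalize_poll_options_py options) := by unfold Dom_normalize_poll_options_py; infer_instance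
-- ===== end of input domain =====

-- B replaces A's fused early-exit loop (with its O(n^2) membership scan) by a pipeline of
-- whole-list passes: strip-map, length-check pass, set-based duplicate check, count bounds.


-- ===== PORT A =====
-- the for-loop of A: accumulates `cleaned`, returning none on any early `return None`
def pvAloop (items : List String) (cleaned : List String) : Option (List String) :=
  match items with
  | [] => some cleaned
  | item :: rest =>
    let value := PySem.Str.strip item
    if value = "" ∨ PySem.Str.len value > 64 then none
    else if value ∈ cleaned then none
    else pvAloop rest (cleaned ++ [value])

def normalize_poll_options_py (options : List String) : Option (List String) :=
  match pvAloop options [] with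
  | none => none
  | some cleaned =>
    if cleaned.length < 2 ∨ cleaned.length > 10 then none else some cleaned

-- ===== PORT B =====
def normalize_poll_options_py_alt (options : List String) : Option (List String) :=
  let cleaned := options.map PySem.Str.strip
  if cleaned.any (fun v => decide (v = "") || decide (PySem.Str.len v > 64)) then none
  else if PySem.Set.len (PySem.Set.ofList cleaned) ≠ PySem.List.len cleaned then none
  else if ¬ (2 ≤ cleaned.length ∧ cleaned.length ≤ 10) then none
  else some cleaned

-- ===== PRECONDITION & SPEC =====
def Spec_normalize_poll_options_py (options : List String) (out : Option (List String)) : Prop := out = normalize_poll_options_py_alt options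
instance (options : List String) (out : Option (List String)) : Decidable (Spec_normalize_poll_options_py options out) := by unfold Spec_normalize_poll_options_py; infer_instance

-- ===== CLAIM (what is proved, stated in full; the proofs are below) =====
def Claim_equal_normalize_poll_options_py : Prop := ∀ (options : List String), Dom_normalize_poll_options_py options → Spec_normalize_poll_options_py options (normalize_poll_options_py options)

-- ===== LEMMAS AND PROOFS =====

theorem length_foldl_add_le {α : Type} [BEq α] (xs : List α) (s : PySem.Set α) :
    (xs.foldl PySem.Set.add s).length ≤ s.length + xs.length := by
  induction xs generalizing s with
  | nil => simp
  | cons x xs ih =>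
    simp only [List.foldl_cons, List.length_cons]
    have h := ih (PySem.Set.add s x)
    have : (PySem.Set.add s x).length ≤ s.length + 1 := by
      unfold PySem.Set.add
      split <;> simp
    omega

theorem foldl_add_len_iff {α : Type} [DecidableEq α] (xs : List α) (s : PySem.Set α)
    (hs : s.Nodup) :
    ((xs.foldl PySem.Set.add s).length = s.length + xs.length ↔ (s ++ xs).Nodup) := by
  induction xs generalizing s with
  | nil => simpa using hs
  | cons x xs ih =>
    simp only [List.foldl_cons]
    by_cases hx : x ∈ s
    · have hadd : PySem.Set.add s x = s := by
        unfold PySem.Set.add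
        simp [PySem.Set.contains, hx]
      rw [hadd]
      constructor
      · intro h
        have hle := length_foldl_add_le xs s
        simp only [List.length_cons] at h
        omega
      · intro h
        exfalso
        have h2 := (List.nodup_append.mp h).2.2
        exact h2 x hx x (List.mem_cons_self) rfl
    · have hadd : PySem.Set.add s x = s ++ [x] := by
        unfold PySem.Set.add
        simp [PySem.Set.contains, hx]
      rw [hadd]
      have hnd : (s ++ [x]).Nodup := by
        simp only [List.nodup_append, List.nodup_cons, List.not_mem_nil,
          not_false_iff, List.nodup_nil, and_true, true_and]
        exact ⟨hs, fun a ha b hb hab => by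
          simp only [List.mem_singleton] at hb
          subst hb; exact hx (hab ▸ ha)⟩
      have hre : s ++ x :: xs = (s ++ [x]) ++ xs := by
        simp only [List.append_assoc, List.singleton_append]
      rw [hre, ← ih (s ++ [x]) hnd]
      simp only [List.length_append, List.length_cons, List.length_nil]
      omega

theorem set_len_eq_iff_nodup (xs : List String) :
    (PySem.Set.len (PySem.Set.ofList xs) = PySem.List.len xs) ↔ xs.Nodup := by
  have h := foldl_add_len_iff xs ([] : PySem.Set String) (by simp)
  simp only [List.nil_append, List.length_nil, Nat.zero_add] at h
  have hof : PySem.Set.ofList xs = xs.foldl PySem.Set.add [] := PySem.Set.ofList_eq_foldl xs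
  simp only [PySem.Set.len, PySem.List.len, hof]
  rw [← h]
  exact Int.natCast_inj

theorem nodup_append_singleton {α : Type} [DecidableEq α] (acc : List α) (v : α)
    (hacc : acc.Nodup) (hmem : v ∉ acc) : (acc ++ [v]).Nodup := by
  simp only [List.nodup_append, List.nodup_cons, List.not_mem_nil, not_false_iff,
    List.nodup_nil, and_true, true_and]
  exact ⟨hacc, fun a ha b hb hab => by
    simp only [List.mem_singleton] at hb
    subst hb; exact hmem (hab ▸ ha)⟩

theorem pvAloop_eq (items : List String) (acc : List String) (hacc : acc.Nodup) :
    pvAloop items acc =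
      if (∃ v ∈ items.map PySem.Str.strip, v = "" ∨ PySem.Str.len v > 64)
          ∨ ¬ (acc ++ items.map PySem.Str.strip).Nodup
      then none else some (acc ++ items.map PySem.Str.strip) := by
  induction items generalizing acc with
  | nil =>
    rw [if_neg (by simp [hacc])]
    simp [pvAloop]
  | cons item rest ih =>
    simp only [pvAloop, List.map_cons]
    by_cases hbad : PySem.Str.strip item = "" ∨ PySem.Str.len (PySem.Str.strip item) > 64
    · rw [if_pos hbad, if_pos (Or.inl ⟨PySem.Str.strip item, by simp, hbad⟩)]
    · rw [if_neg hbad]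
      by_cases hmem : PySem.Str.strip item ∈ acc
      · rw [if_pos hmem, if_pos]
        right
        intro h
        have h2 := (List.nodup_append.mp h).2.2
        exact h2 _ hmem _ (List.mem_cons_self) rfl
      · rw [if_neg hmem, ih _ (nodup_append_singleton acc _ hacc hmem)]
        have hre : (acc ++ [PySem.Str.strip item]) ++ rest.map PySem.Str.strip
            = acc ++ (PySem.Str.strip item :: rest.map PySem.Str.strip) := by
          simp only [List.append_assoc, List.singleton_append]
        rw [hre]
        congr 1
        simp only [eq_iff_iff]
        constructor
        · rintro (⟨v, hv, h⟩ | h)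
          · exact Or.inl ⟨v, List.mem_cons_of_mem _ hv, h⟩
          · exact Or.inr h
        · rintro (⟨v, hv, h⟩ | h)
          · rcases List.mem_cons.mp hv with rfl | hv
            · exact absurd h hbad
            · exact Or.inl ⟨v, hv, h⟩
          · exact Or.inr h

-- ===== VERDICT (by name: the statement is the Claim_ definition above) =====
theorem normalize_poll_options_py_spec : Claim_equal_normalize_poll_options_py := by
  intro options _
  unfold Spec_normalize_poll_options_py normalize_poll_options_py normalize_poll_options_py_alt
  rw [pvAloop_eq options [] List.nodup_nil]
  simp only [List.nil_append]
  set cleaned := options.map PySem.Str.strip with hc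
  by_cases hbad : ∃ v ∈ cleaned, v = "" ∨ PySem.Str.len v > 64
  · rw [if_pos (Or.inl hbad)]
    have hany : cleaned.any (fun v => decide (v = "") || decide (PySem.Str.len v > 64)) = true := by
      rcases hbad with ⟨v, hv, h⟩
      refine List.any_eq_true.mpr ⟨v, hv, ?_⟩
      rw [Bool.or_eq_true, decide_eq_true_eq, decide_eq_true_eq]
      exact h
    rw [if_pos hany]
  · have hany : (cleaned.any (fun v => decide (v = "") || decide (PySem.Str.len v > 64))) = false := by
      refine List.any_eq_false.mpr ?_
      intro v hv
      simp only [Bool.not_eq_true, Bool.or_eq_false_iff, decide_eq_false_iff_not]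
      exact ⟨fun h => hbad ⟨v, hv, Or.inl h⟩, fun h => hbad ⟨v, hv, Or.inr h⟩⟩
    have hnotany : ¬ ((cleaned.any fun v => decide (v = "") || decide (PySem.Str.len v > 64)) = true) := by
      rw [hany]; exact Bool.false_ne_true
    rw [if_neg hnotany]
    by_cases hnd : cleaned.Nodup
    · rw [if_neg (by rintro (h | h); exacts [hbad h, h hnd])]
      have hset : PySem.Set.len (PySem.Set.ofList cleaned) = PySem.List.len cleaned :=
        (set_len_eq_iff_nodup cleaned).mpr hnd
      rw [if_neg (fun hne => hne hset)]
      show (if cleaned.length < 2 ∨ cleaned.length > 10 then (none : Option (List String))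
        else some cleaned) = _
      by_cases hlen : cleaned.length < 2 ∨ cleaned.length > 10
      · rw [if_pos hlen, if_pos (by omega)]
      · rw [if_neg hlen, if_neg (by omega)]
    · rw [if_pos (Or.inr hnd)]
      have hset : PySem.Set.len (PySem.Set.ofList cleaned) ≠ PySem.List.len cleaned :=
        fun h => hnd ((set_len_eq_iff_nodup cleaned).mp h)
      rw [if_pos hset]
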